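-- pv_equiv track=rewrite | github.com/PluvioXO/pytorch-graph | pytorch_graph/renderers/diagram_renderer.py | _classify_layer_family
-- ===== SOURCE A (Python) =====
-- def _classify_layer_family(layer_type: str) -> str:
--     """Group layer types into broader visual families for cleaner legends."""
--     normalized = layer_type.lower()
--
--     if "conv" in normalized:
--         return "Convolution"
--     if any(token in normalized for token in ["linear", "bilinear"]):
--         return "Dense"
--     if any(token in normalized for token in ["relu", "gelu", "sigmoid", "tanh", "silu", "softmax"]):
--         return "Activation"
--     if "norm" in normalized:
--         return "Normalization"
--     if "pool" in normalized:
--         return "Pooling"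
--     if any(token in normalized for token in ["lstm", "gru", "rnn"]):
--         return "Recurrent"
--     if any(token in normalized for token in ["dropout"]):
--         return "Regularization"
--     if any(token in normalized for token in ["flatten", "reshape"]):
--         return "Tensor Shape"
--     return "Other"
-- ===== SOURCE B (Python) =====
-- _TOKEN_FAMILY = {
--     "conv": "Convolution",
--     "linear": "Dense", "bilinear": "Dense",
--     "relu": "Activation", "gelu": "Activation", "sigmoid": "Activation",
--     "tanh": "Activation", "silu": "Activation", "softmax": "Activation",
--     "norm": "Normalization",
--     "pool": "Pooling",
--     "lstm": "Recurrent", "gru": "Recurrent", "rnn": "Recurrent",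
--     "dropout": "Regularization",
--     "flatten": "Tensor Shape", "reshape": "Tensor Shape",
-- }
-- _TOKEN_LENGTHS = [3, 4, 6, 7, 8]
-- _FAMILY_PRIORITY = ["Convolution", "Dense", "Activation", "Normalization",
--                     "Pooling", "Recurrent", "Regularization", "Tensor Shape"]
--
--
-- def _classify_layer_family(layer_type: str) -> str:
--     """Group layer types into broader visual families for cleaner legends."""
--     s = layer_type.lower()
--     found = set()
--     for j in range(len(s)):
--         for n in _TOKEN_LENGTHS:
--             fam = _TOKEN_FAMILY.get(s[j:j + n])
--             if fam is not None:
--                 found.add(fam)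
--     for fam in _FAMILY_PRIORITY:
--         if fam in found:
--             return fam
--     return "Other"
-- ===== Notes on version B (the rewrite author's own statement) =====
-- stated objective: alternative
-- what changed: Instead of testing each hard-coded token against the whole string, B scans the string's positions once, looks up each candidate substring (of the token lengths) in a token-to-family dictionary, collects the matched families in a set, and returns the first family in priority order.
import Mathlib
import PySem

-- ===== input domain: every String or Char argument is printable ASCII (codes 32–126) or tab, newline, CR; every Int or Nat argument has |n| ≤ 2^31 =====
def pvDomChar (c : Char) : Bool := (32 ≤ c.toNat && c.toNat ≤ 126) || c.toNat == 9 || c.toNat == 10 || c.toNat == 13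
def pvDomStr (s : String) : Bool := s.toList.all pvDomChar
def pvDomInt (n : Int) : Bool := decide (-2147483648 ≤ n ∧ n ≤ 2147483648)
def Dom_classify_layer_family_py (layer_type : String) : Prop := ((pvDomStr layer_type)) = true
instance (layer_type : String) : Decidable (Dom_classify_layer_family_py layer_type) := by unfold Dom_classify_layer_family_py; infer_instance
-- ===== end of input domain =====

-- B replaces A's per-token containment cascade by a single scan of the string's positions with a
-- substring→family dictionary lookup and a found-family set, then a priority pick ('alternative').

-- ===== PORT A =====
def classify_layer_family_py (layer_type : String) : String :=
  let normalized := PySem.Str.lower layer_type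
  if PySem.Str.isIn "conv" normalized then "Convolution"
  else if ["linear", "bilinear"].any (fun token => PySem.Str.isIn token normalized) then "Dense"
  else if ["relu", "gelu", "sigmoid", "tanh", "silu", "softmax"].any (fun token => PySem.Str.isIn token normalized) then "Activation"
  else if PySem.Str.isIn "norm" normalized then "Normalization"
  else if PySem.Str.isIn "pool" normalized then "Pooling"
  else if ["lstm", "gru", "rnn"].any (fun token => PySem.Str.isIn token normalized) then "Recurrent"
  else if ["dropout"].any (fun token => PySem.Str.isIn token normalized) then "Regularization"
  else if ["flatten", "reshape"].any (fun token => PySem.Str.isIn token normalized) then "Tensor Shape"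
  else "Other"

-- ===== PORT B =====
-- the module-level dict _TOKEN_FAMILY (literal dict, distinct keys)
def tokenFamily : PySem.Dict String String :=
  PySem.Dict.ofList
    [ ("conv", "Convolution"),
      ("linear", "Dense"), ("bilinear", "Dense"),
      ("relu", "Activation"), ("gelu", "Activation"), ("sigmoid", "Activation"),
      ("tanh", "Activation"), ("silu", "Activation"), ("softmax", "Activation"),
      ("norm", "Normalization"),
      ("pool", "Pooling"),
      ("lstm", "Recurrent"), ("gru", "Recurrent"), ("rnn", "Recurrent"),
      ("dropout", "Regularization"),
      ("flatten", "Tensor Shape"), ("reshape", "Tensor Shape") ]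

def tokenLengths : List Int := [3, 4, 6, 7, 8]

def familyPriority : List String :=
  ["Convolution", "Dense", "Activation", "Normalization",
   "Pooling", "Recurrent", "Regularization", "Tensor Shape"]

-- inner loop 'for n in _TOKEN_LENGTHS: fam = _TOKEN_FAMILY.get(s[j:j+n]); if fam is not None: found.add(fam)'
def scanAt (s : String) (found : PySem.Set String) (j : Int) : PySem.Set String :=
  tokenLengths.foldl (fun st n =>
    match tokenFamily.get? (PySem.Str.slice s (some j) (some (j + n))) with
    | some fam => PySem.Set.add st fam
    | none => st) found

-- outer loop 'for j in range(len(s)): …'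
def foundFamilies (s : String) : PySem.Set String :=
  (PySem.List.pyRange 0 (PySem.Str.len s) 1).foldl (scanAt s) PySem.Set.empty

-- final 'for fam in _FAMILY_PRIORITY: if fam in found: return fam' / 'return "Other"'
def firstPresent (prio : List String) (found : PySem.Set String) : String :=
  match prio with
  | [] => "Other"
  | fam :: rest => if PySem.Set.contains found fam then fam else firstPresent rest found

def classify_layer_family_py_alt (layer_type : String) : String :=
  firstPresent familyPriority (foundFamilies (PySem.Str.lower layer_type))

-- ===== PRECONDITION & SPEC =====
def Spec_classify_layer_family_py (layer_type : String) (out : String) : Prop := out = classify_layer_family_py_alt layer_type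
instance (layer_type : String) (out : String) : Decidable (Spec_classify_layer_family_py layer_type out) := by unfold Spec_classify_layer_family_py; infer_instance

-- ===== CLAIM (what is proved, stated in full; the proofs are below) =====
def Claim_equal_classify_layer_family_py : Prop := ∀ (layer_type : String), Dom_classify_layer_family_py layer_type → Spec_classify_layer_family_py layer_type (classify_layer_family_py layer_type)


-- ===== LEMMAS AND PROOFS =====

-- the items list of the literal dict, spelled out
theorem tokenFamily_items : tokenFamily.items =
    [ ("conv", "Convolution"),
      ("linear", "Dense"), ("bilinear", "Dense"),
      ("relu", "Activation"), ("gelu", "Activation"), ("sigmoid", "Activation"),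
      ("tanh", "Activation"), ("silu", "Activation"), ("softmax", "Activation"),
      ("norm", "Normalization"),
      ("pool", "Pooling"),
      ("lstm", "Recurrent"), ("gru", "Recurrent"), ("rnn", "Recurrent"),
      ("dropout", "Regularization"),
      ("flatten", "Tensor Shape"), ("reshape", "Tensor Shape") ] := by decide

theorem tokenFamily_keys_nodup : tokenFamily.keys.Nodup := by decide

-- every key of the dict has one of the scanned lengths and is nonempty
theorem tokenFamily_key_shape : ∀ p ∈ tokenFamily.items,
    ((p.1.toList.length : Int) ∈ tokenLengths) ∧ p.1.toList ≠ [] := by decide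

-- membership in a fold that conditionally adds the result of an optional lookup
theorem mem_foldl_addOpt (L : List Int) (f : Int → Option String) (st : PySem.Set String) (y : String) :
    y ∈ L.foldl (fun st n => match f n with
      | some g => PySem.Set.add st g
      | none => st) st ↔ y ∈ st ∨ ∃ n ∈ L, f n = some y := by
  induction L generalizing st with
  | nil => simp
  | cons a L ih =>
    cases h : f a with
    | none => simp [h, ih]
    | some g => simp [h, ih, PySem.Set.mem_add]; tauto

-- membership in the inner fold over lengths
theorem mem_scanAt (s : String) (found : PySem.Set String) (j : Int) (fam : String) :
    fam ∈ scanAt s found j ↔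
      fam ∈ found ∨ ∃ n ∈ tokenLengths,
        tokenFamily.get? (PySem.Str.slice s (some j) (some (j + n))) = some fam := by
  exact mem_foldl_addOpt tokenLengths
    (fun n => tokenFamily.get? (PySem.Str.slice s (some j) (some (j + n)))) found fam

-- membership in the outer fold over positions
theorem mem_foundFold (s : String) (js : List Int) (st : PySem.Set String) (fam : String) :
    fam ∈ js.foldl (scanAt s) st ↔
      fam ∈ st ∨ ∃ j ∈ js, ∃ n ∈ tokenLengths,
        tokenFamily.get? (PySem.Str.slice s (some j) (some (j + n))) = some fam := by
  induction js generalizing st with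
  | nil => simp
  | cons a js ih =>
    simp only [List.foldl_cons, ih, mem_scanAt, List.mem_cons]
    constructor
    · rintro ((h | h) | h)
      · tauto
      · exact Or.inr ⟨a, Or.inl rfl, h⟩
      · rcases h with ⟨j, hj, h⟩; exact Or.inr ⟨j, Or.inr hj, h⟩
    · rintro (h | ⟨j, (rfl | hj), h⟩)
      · tauto
      · exact Or.inl (Or.inr h)
      · exact Or.inr ⟨j, hj, h⟩

-- a token (of one of the scanned lengths) shows up as a slice at some position iff it is a substring
theorem exists_slice_eq_iff_isIn (s t : String)
    (hlen : (t.toList.length : Int) ∈ tokenLengths) (hne : t.toList ≠ []) :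
    (∃ j ∈ PySem.List.pyRange 0 (PySem.Str.len s) 1, ∃ n ∈ tokenLengths,
        PySem.Str.slice s (some j) (some (j + n)) = t) ↔ PySem.Str.isIn t s = true := by
  rw [PySem.Str.isIn_eq, ← PySem.Chars.exists_prefix_drop_iff_isIn]
  constructor
  · rintro ⟨j, hj, n, hn, hslice⟩
    rw [PySem.List.mem_pyRange_one] at hj
    have hn0 : 0 ≤ n := by
      simp [tokenLengths] at hn; rcases hn with h | h | h | h | h <;> omega
    have h := congrArg String.toList hslice
    rw [PySem.Str.toList_slice] at h
    simp only [PySem.Chars.slice] at h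
    rw [PySem.List.slice_toNat _ hj.1 (by omega)] at h
    exact ⟨j.toNat, h ▸ List.take_prefix _ _⟩
  · rintro ⟨k, hk⟩
    have hklt : k < s.toList.length := by
      by_contra hge
      rw [List.drop_eq_nil_of_le (by omega)] at hk
      exact hne (List.prefix_nil.mp hk)
    refine ⟨(k : Int), ?_, (t.toList.length : Int), hlen, ?_⟩
    · rw [PySem.List.mem_pyRange_one, PySem.Str.len_eq]
      exact ⟨Int.natCast_nonneg k, by exact_mod_cast hklt⟩
    · apply String.toList_inj.mp
      rw [PySem.Str.toList_slice]
      simp only [PySem.Chars.slice]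
      rw [PySem.List.slice_toNat _ (Int.natCast_nonneg k) (by omega)]
      have h1 : ((k : Int) + (t.toList.length : Int)).toNat = k + t.toList.length := by omega
      have h2 : ((k : Int)).toNat = k := by omega
      rw [h1, h2, Nat.add_sub_cancel_left]
      exact (List.prefix_iff_eq_take.mp hk).symm

-- per-family characterization of the found set
theorem mem_found_iff (s : String) (fam : String) :
    fam ∈ foundFamilies s ↔
      ∃ t, (t, fam) ∈ tokenFamily.items ∧ PySem.Str.isIn t s = true := by
  unfold foundFamilies
  rw [mem_foundFold]
  simp only [PySem.Set.empty, List.not_mem_nil, false_or]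
  constructor
  · rintro ⟨j, hj, n, hn, hget⟩
    have hmem := (PySem.Dict.get?_eq_some_iff_mem_items _ _ _ tokenFamily_keys_nodup).mp hget
    have hshape := tokenFamily_key_shape _ hmem
    exact ⟨_, hmem, (exists_slice_eq_iff_isIn s _ hshape.1 hshape.2).mp ⟨j, hj, n, hn, rfl⟩⟩
  · rintro ⟨t, hmem, hin⟩
    have hshape := tokenFamily_key_shape _ hmem
    obtain ⟨j, hj, n, hn, hslice⟩ := (exists_slice_eq_iff_isIn s t hshape.1 hshape.2).mpr hin
    refine ⟨j, hj, n, hn, ?_⟩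
    rw [hslice]
    exact (PySem.Dict.get?_eq_some_iff_mem_items _ _ _ tokenFamily_keys_nodup).mpr hmem

-- the eight per-family containment facts
theorem found_conv (s : String) :
    PySem.Set.contains (foundFamilies s) "Convolution" = PySem.Str.isIn "conv" s := by
  rw [Bool.eq_iff_iff, PySem.Set.contains_iff, mem_found_iff, tokenFamily_items]
  simp

theorem found_dense (s : String) :
    PySem.Set.contains (foundFamilies s) "Dense"
      = (PySem.Str.isIn "linear" s || PySem.Str.isIn "bilinear" s) := by
  rw [Bool.eq_iff_iff, PySem.Set.contains_iff, mem_found_iff, tokenFamily_items]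
  simp

theorem found_act (s : String) :
    PySem.Set.contains (foundFamilies s) "Activation"
      = (PySem.Str.isIn "relu" s || (PySem.Str.isIn "gelu" s || (PySem.Str.isIn "sigmoid" s || (PySem.Str.isIn "tanh" s || (PySem.Str.isIn "silu" s || PySem.Str.isIn "softmax" s))))) := by
  rw [Bool.eq_iff_iff, PySem.Set.contains_iff, mem_found_iff, tokenFamily_items]
  simp

theorem found_norm (s : String) :
    PySem.Set.contains (foundFamilies s) "Normalization" = PySem.Str.isIn "norm" s := by
  rw [Bool.eq_iff_iff, PySem.Set.contains_iff, mem_found_iff, tokenFamily_items]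
  simp

theorem found_pool (s : String) :
    PySem.Set.contains (foundFamilies s) "Pooling" = PySem.Str.isIn "pool" s := by
  rw [Bool.eq_iff_iff, PySem.Set.contains_iff, mem_found_iff, tokenFamily_items]
  simp

theorem found_rec (s : String) :
    PySem.Set.contains (foundFamilies s) "Recurrent"
      = (PySem.Str.isIn "lstm" s || (PySem.Str.isIn "gru" s || PySem.Str.isIn "rnn" s)) := by
  rw [Bool.eq_iff_iff, PySem.Set.contains_iff, mem_found_iff, tokenFamily_items]
  simp

theorem found_drop (s : String) :
    PySem.Set.contains (foundFamilies s) "Regularization" = PySem.Str.isIn "dropout" s := by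
  rw [Bool.eq_iff_iff, PySem.Set.contains_iff, mem_found_iff, tokenFamily_items]
  simp

theorem found_shape (s : String) :
    PySem.Set.contains (foundFamilies s) "Tensor Shape"
      = (PySem.Str.isIn "flatten" s || PySem.Str.isIn "reshape" s) := by
  rw [Bool.eq_iff_iff, PySem.Set.contains_iff, mem_found_iff, tokenFamily_items]
  simp

-- ===== VERDICT (by name: the statement is the Claim_ definition above) =====
theorem classify_layer_family_py_spec : Claim_equal_classify_layer_family_py := by
  intro layer_type _
  unfold Spec_classify_layer_family_py classify_layer_family_py classify_layer_family_py_alt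
  simp only [familyPriority, firstPresent, found_conv, found_dense, found_act, found_norm,
    found_pool, found_rec, found_drop, found_shape, List.any_cons, List.any_nil, Bool.or_false]
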